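-- pv_equiv track=rewrite | github.com/pypi-data/pypi-mirror-37 | packages/whtools/whtools-0.0.8.tar.gz/whtools-0.0.8/whtools/morse.py | decode2bool
-- ===== SOURCE A (Python) =====
-- def decode2bool(txt, lines=('-', '_'), dots=('.',), endletter=('/', ' '), endword=('\n'), ignore=False):
--     seq = []
--     letter = []
--     for char in txt:
--         if char in lines:
--             letter.append(True)
--         elif char in dots:
--             letter.append(False)
--         elif char in endletter:
--             if letter == []:
--                 seq.append(())
--             else:
--                 seq.append(tuple(letter))
--                 letter = []
--         elif not ignore:
--             raise ValueError('char {} cannot be decoded as morse.'.format(char))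
--     return tuple(seq)
-- ===== SOURCE B (Python) =====
-- def decode2bool(txt, lines=('-', '_'), dots=('.',), endletter=('/', ' '), endword=('\n'), ignore=False):
--     seq = []
--     start = 0
--     for i, char in enumerate(txt):
--         if char in lines or char in dots:
--             continue
--         if char in endletter:
--             seq.append(tuple(c in lines for c in txt[start:i] if c in lines or c in dots))
--             start = i + 1
--         elif not ignore:
--             raise ValueError('char {} cannot be decoded as morse.'.format(char))
--     return tuple(seq)
-- ===== Notes on version B (the rewrite author's own statement) =====
-- stated objective: alternative
-- what changed: B replaces A's incremental letter accumulator by a two-pointer scan: it remembers the start index of the current letter and decodes the whole slice txt[start:i] only when a letter-terminator is reached; Pre_ excludes exactly the inputs on which A raises ValueError (ignore false and some char in none of lines/dots/endletter).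
import Mathlib
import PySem

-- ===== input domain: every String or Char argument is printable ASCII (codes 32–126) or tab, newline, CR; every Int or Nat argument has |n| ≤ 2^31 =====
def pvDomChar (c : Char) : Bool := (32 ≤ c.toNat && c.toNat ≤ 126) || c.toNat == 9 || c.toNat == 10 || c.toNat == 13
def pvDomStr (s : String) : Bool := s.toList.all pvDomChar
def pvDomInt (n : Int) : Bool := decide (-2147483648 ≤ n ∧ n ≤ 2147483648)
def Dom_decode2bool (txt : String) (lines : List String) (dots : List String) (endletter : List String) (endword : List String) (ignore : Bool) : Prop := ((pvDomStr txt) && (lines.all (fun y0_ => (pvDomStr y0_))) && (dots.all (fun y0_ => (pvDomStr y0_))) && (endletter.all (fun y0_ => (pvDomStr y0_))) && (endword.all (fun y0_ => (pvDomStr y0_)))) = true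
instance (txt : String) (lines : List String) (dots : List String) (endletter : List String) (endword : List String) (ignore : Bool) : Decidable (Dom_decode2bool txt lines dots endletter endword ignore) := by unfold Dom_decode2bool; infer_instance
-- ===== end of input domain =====

-- B replaces A's incremental per-char letter accumulator by a two-pointer scan that remembers
-- the start index of the current letter and decodes the slice txt[start:i] only at a terminator;
-- objective: alternative decomposition, same asymptotic cost.


-- Python `char in tup` where `char` is a 1-char string and `tup` a tuple of strings:
-- equality membership.
def pvMemS (c : Char) (l : List String) : Bool := l.any (fun s => s.toList == [c])

-- ===== PORT A =====
-- one step of A's for-loop; state = (seq, letter)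
def pvStepA (lines dots endletter : List String) (ignore : Bool)
    (st : List (List Bool) × List Bool) (char : Char) : List (List Bool) × List Bool :=
  if pvMemS char lines then (st.1, st.2 ++ [true])
  else if pvMemS char dots then (st.1, st.2 ++ [false])
  else if pvMemS char endletter then
    (if st.2 = [] then (st.1 ++ [([] : List Bool)], st.2) else (st.1 ++ [st.2], []))
  else
    -- here Python A raises ValueError when ignore = false (excluded by Pre_); skips when ignore
    st

def decode2bool (txt : String) (lines : List String) (dots : List String) (endletter : List String) (endword : List String) (ignore : Bool) : List (List Bool) :=
  (txt.toList.foldl (pvStepA lines dots endletter ignore) (([] : List (List Bool)), ([] : List Bool))).1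

-- ===== PORT B =====
-- the generator `tuple(c in lines for c in seg if c in lines or c in dots)`
def pvDec (lines dots : List String) (seg : List Char) : List Bool :=
  (seg.filter (fun c => pvMemS c lines || pvMemS c dots)).map (fun c => pvMemS c lines)

-- one step of B's for-loop over enumerate(txt); state = (seq, start)
def pvStepB (lines dots endletter : List String) (ignore : Bool) (cs : List Char)
    (st : List (List Bool) × Int) (p : Int × Char) : List (List Bool) × Int :=
  if pvMemS p.2 lines || pvMemS p.2 dots then st
  else if pvMemS p.2 endletter then
    (st.1 ++ [pvDec lines dots (PySem.List.slice cs (some st.2) (some p.1))], p.1 + 1)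
  else
    -- here Python B raises ValueError when ignore = false (excluded by Pre_); skips when ignore
    st

def decode2bool_alt (txt : String) (lines : List String) (dots : List String) (endletter : List String) (endword : List String) (ignore : Bool) : List (List Bool) :=
  ((PySem.List.enumerate txt.toList 0).foldl
      (pvStepB lines dots endletter ignore txt.toList)
      (([] : List (List Bool)), (0 : Int))).1

-- ===== PRECONDITION & SPEC =====
-- Pre_ excludes exactly the inputs on which A raises ValueError: ignore = false and some
-- char of txt is in none of lines/dots/endletter.
def Pre_decode2bool (txt : String) (lines : List String) (dots : List String) (endletter : List String) (endword : List String) (ignore : Bool) : Prop :=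
  ignore = true ∨ txt.toList.all (fun c => pvMemS c lines || pvMemS c dots || pvMemS c endletter) = true

instance (txt : String) (lines : List String) (dots : List String) (endletter : List String) (endword : List String) (ignore : Bool) : Decidable (Pre_decode2bool txt lines dots endletter endword ignore) := by unfold Pre_decode2bool; infer_instance

def pvWitness_decode2bool : String × List String × List String × List String × List String × Bool :=
  ("-. / .", ["-"], ["."], ["/", " "], ["\n"], false)

def Spec_decode2bool (txt : String) (lines : List String) (dots : List String) (endletter : List String) (endword : List String) (ignore : Bool) (out : List (List Bool)) : Prop := out = decode2bool_alt txt lines dots endletter endword ignore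
instance (txt : String) (lines : List String) (dots : List String) (endletter : List String) (endword : List String) (ignore : Bool) (out : List (List Bool)) : Decidable (Spec_decode2bool txt lines dots endletter endword ignore out) := by unfold Spec_decode2bool; infer_instance

-- ===== CLAIM (what is proved, stated in full; the proofs are below) =====
def Claim_equal_decode2bool : Prop := ∀ (txt : String) (lines : List String) (dots : List String) (endletter : List String) (endword : List String) (ignore : Bool), Dom_decode2bool txt lines dots endletter endword ignore → Pre_decode2bool txt lines dots endletter endword ignore → Spec_decode2bool txt lines dots endletter endword ignore (decode2bool txt lines dots endletter endword ignore)

-- ===== LEMMAS AND PROOFS =====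

-- decoding a segment extended by one char
theorem pvDec_append_singleton (lines dots : List String) (seg : List Char) (c : Char) :
    pvDec lines dots (seg ++ [c])
      = pvDec lines dots seg
        ++ (if pvMemS c lines then [true] else if pvMemS c dots then [false] else []) := by
  by_cases hl : pvMemS c lines = true <;> by_cases hd : pvMemS c dots = true <;>
    simp [pvDec, List.filter_append, hl, hd]

-- extending the slice txt[start:k] by the char at index k
theorem pv_slice_succ (full : List Char) (start k : Nat) (c : Char) (rest : List Char)
    (hs : start ≤ k) (hd : full.drop k = c :: rest) :
    PySem.List.slice full (some (start : Int)) (some ((k : Int) + 1))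
      = PySem.List.slice full (some (start : Int)) (some (k : Int)) ++ [c] := by
  have h1 : ((k : Int) + 1) = ((k + 1 : Nat) : Int) := by push_cast; ring
  rw [h1, PySem.List.slice_natCast, PySem.List.slice_natCast]
  have h2 : k + 1 - start = (k - start) + 1 := by omega
  have h3 : (full.drop start)[k - start]? = some c := by
    rw [List.getElem?_drop]
    have : start + (k - start) = k := by omega
    rw [this]
    have := congrArg (fun l => l[0]?) hd
    simpa [List.getElem?_drop] using this
  rw [h2, List.take_add_one, h3]
  rfl

-- empty slice txt[k:k]
theorem pv_slice_self (full : List Char) (k : Nat) :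
    PySem.List.slice full (some (k : Int)) (some (k : Int)) = [] := by
  rw [PySem.List.slice_natCast]; simp

-- main invariant: A's fold from (seq, letter = decode of txt[start:k]) equals B's fold
-- over enumerate(rest of txt from k) from (seq, start)
theorem pv_fold_eq (lines dots endletter : List String) (ignore : Bool) (full : List Char) :
    ∀ (cs : List Char) (k start : Nat) (seq : List (List Bool)),
      cs = full.drop k → start ≤ k →
      (cs.foldl (pvStepA lines dots endletter ignore)
          (seq, pvDec lines dots (PySem.List.slice full (some (start : Int)) (some (k : Int))))).1
        = ((PySem.List.enumerate cs (k : Int)).foldl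
            (pvStepB lines dots endletter ignore full) (seq, (start : Int))).1 := by
  intro cs
  induction cs with
  | nil => intro k start seq _ _; simp [PySem.List.enumerate_nil]
  | cons c cs ih =>
    intro k start seq hdrop hs
    have hdrop' : cs = full.drop (k + 1) := by
      have h := congrArg (List.drop 1) hdrop
      simpa [List.drop_drop, Nat.add_comm] using h
    rw [PySem.List.enumerate_cons]
    by_cases hl : pvMemS c lines = true
    · have hA : pvStepA lines dots endletter ignore
          (seq, pvDec lines dots (PySem.List.slice full (some (start : Int)) (some (k : Int)))) c
          = (seq, pvDec lines dots (PySem.List.slice full (some (start : Int)) (some (k : Int))) ++ [true]) := by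
        simp [pvStepA, hl]
      have hB : pvStepB lines dots endletter ignore full (seq, (start : Int)) ((k : Int), c)
          = (seq, (start : Int)) := by simp [pvStepB, hl]
      have hsl := pv_slice_succ full start k c cs hs hdrop.symm
      have hx := pvDec_append_singleton lines dots
        (PySem.List.slice full (some (start : Int)) (some (k : Int))) c
      rw [List.foldl_cons, List.foldl_cons, hA, hB]
      have := ih (k + 1) start seq hdrop' (by omega)
      rw [Nat.cast_add, Nat.cast_one] at this
      rw [← this, hsl, hx]
      simp [hl]
    · by_cases hdt : pvMemS c dots = true
      · have hA : pvStepA lines dots endletter ignore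
            (seq, pvDec lines dots (PySem.List.slice full (some (start : Int)) (some (k : Int)))) c
            = (seq, pvDec lines dots (PySem.List.slice full (some (start : Int)) (some (k : Int))) ++ [false]) := by
          simp [pvStepA, hl, hdt]
        have hB : pvStepB lines dots endletter ignore full (seq, (start : Int)) ((k : Int), c)
            = (seq, (start : Int)) := by simp [pvStepB, hdt]
        have hsl := pv_slice_succ full start k c cs hs hdrop.symm
        have hx := pvDec_append_singleton lines dots
          (PySem.List.slice full (some (start : Int)) (some (k : Int))) c
        rw [List.foldl_cons, List.foldl_cons, hA, hB]
        have := ih (k + 1) start seq hdrop' (by omega)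
        rw [Nat.cast_add, Nat.cast_one] at this
        rw [← this, hsl, hx]
        simp [hl, hdt]
      · by_cases he : pvMemS c endletter = true
        · have hA : pvStepA lines dots endletter ignore
              (seq, pvDec lines dots (PySem.List.slice full (some (start : Int)) (some (k : Int)))) c
              = (seq ++ [pvDec lines dots (PySem.List.slice full (some (start : Int)) (some (k : Int)))], []) := by
            by_cases hlet : pvDec lines dots (PySem.List.slice full (some (start : Int)) (some (k : Int))) = [] <;>
              simp [pvStepA, hl, hdt, he, hlet]
          have hB : pvStepB lines dots endletter ignore full (seq, (start : Int)) ((k : Int), c)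
              = (seq ++ [pvDec lines dots (PySem.List.slice full (some (start : Int)) (some (k : Int)))], (k : Int) + 1) := by
            simp [pvStepB, hl, hdt, he]
          rw [List.foldl_cons, List.foldl_cons, hA, hB]
          have := ih (k + 1) (k + 1)
            (seq ++ [pvDec lines dots (PySem.List.slice full (some (start : Int)) (some (k : Int)))])
            hdrop' (by omega)
          rw [pv_slice_self] at this
          rw [Nat.cast_add, Nat.cast_one] at this
          simpa [pvDec] using this
        · have hA : pvStepA lines dots endletter ignore
              (seq, pvDec lines dots (PySem.List.slice full (some (start : Int)) (some (k : Int)))) c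
              = (seq, pvDec lines dots (PySem.List.slice full (some (start : Int)) (some (k : Int)))) := by
            simp [pvStepA, hl, hdt, he]
          have hB : pvStepB lines dots endletter ignore full (seq, (start : Int)) ((k : Int), c)
              = (seq, (start : Int)) := by simp [pvStepB, hl, hdt, he]
          have hsl := pv_slice_succ full start k c cs hs hdrop.symm
          have hx := pvDec_append_singleton lines dots
            (PySem.List.slice full (some (start : Int)) (some (k : Int))) c
          rw [List.foldl_cons, List.foldl_cons, hA, hB]
          have := ih (k + 1) start seq hdrop' (by omega)
          rw [Nat.cast_add, Nat.cast_one] at this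
          rw [← this, hsl, hx]
          simp [hl, hdt]

-- ===== VERDICT (by name: the statement is the Claim_ definition above) =====
theorem decode2bool_spec : Claim_equal_decode2bool := by
  intro txt lines dots endletter endword ignore _ _
  unfold Spec_decode2bool decode2bool decode2bool_alt
  have := pv_fold_eq lines dots endletter ignore txt.toList txt.toList 0 0 [] (by simp) (by omega)
  rw [pv_slice_self] at this
  rw [Nat.cast_zero] at this
  simpa [pvDec] using this
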